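-- pv_equiv track=rewrite | github.com/miliar/Code_Jam_Webscraper | solutions_python/solutions_year16_round0_nr2/2387.py | get_idxs
-- ===== SOURCE A (Python) =====
-- def get_idxs(stack):
--     f_sad, l_sad,  f_happy = None, None, None
--     for i, p in enumerate(stack):
--         if p == "-":
--             if f_sad is None:
--                 f_sad = i
--             l_sad = i
--         else:
--             if f_happy is None:
--                 f_happy = i
--     return f_sad, l_sad, f_happy
-- ===== SOURCE B (Python) =====
-- def get_idxs(stack):
--     f_sad = next((i for i, p in enumerate(stack) if p == "-"), None)
--     f_happy = next((i for i, p in enumerate(stack) if p != "-"), None)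
--     l_sad = next((len(stack) - 1 - j for j, p in enumerate(reversed(stack)) if p == "-"), None)
--     return f_sad, l_sad, f_happy
-- ===== Notes on version B (the rewrite author's own statement) =====
-- stated objective: simpler
-- what changed: Replaces the single fused loop carrying three pieces of state with three independent single-purpose searches (first '-', first non-'-', and the last '-' found by a reverse scan that stops at the first hit).
import Mathlib
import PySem

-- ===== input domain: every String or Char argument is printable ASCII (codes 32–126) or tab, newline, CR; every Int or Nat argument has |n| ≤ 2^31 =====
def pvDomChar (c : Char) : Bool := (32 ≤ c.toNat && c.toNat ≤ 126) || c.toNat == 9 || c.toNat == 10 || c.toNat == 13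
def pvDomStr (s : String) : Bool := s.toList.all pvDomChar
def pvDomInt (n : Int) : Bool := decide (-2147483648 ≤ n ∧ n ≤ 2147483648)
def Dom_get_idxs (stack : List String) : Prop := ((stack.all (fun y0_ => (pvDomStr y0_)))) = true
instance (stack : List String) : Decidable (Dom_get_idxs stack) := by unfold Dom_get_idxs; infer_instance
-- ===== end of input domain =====

-- B replaces A's single fused loop by three independent single-purpose searches
-- (first '-', first non-'-', last '-' via a reverse scan); objective: simpler.

-- ===== PORT A =====
-- the fused loop of A: state (f_sad, l_sad, f_happy), index i
def getIdxsLoop : List String → Int → (Option Int × Option Int × Option Int) → (Option Int × Option Int × Option Int)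
  | [], _, s => s
  | p :: rest, i, (f_sad, l_sad, f_happy) =>
    if p = "-" then
      getIdxsLoop rest (i + 1) ((if f_sad = none then some i else f_sad), some i, f_happy)
    else
      getIdxsLoop rest (i + 1) (f_sad, l_sad, (if f_happy = none then some i else f_happy))

def get_idxs (stack : List String) : Option Int × Option Int × Option Int :=
  getIdxsLoop stack 0 (none, none, none)

-- ===== PORT B =====
-- first index (from i) whose element equals "-"
def firstEq : List String → Int → Option Int
  | [], _ => none
  | p :: rest, i => if p = "-" then some i else firstEq rest (i + 1)

-- first index (from i) whose element differs from "-"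
def firstNe : List String → Int → Option Int
  | [], _ => none
  | p :: rest, i => if p = "-" then firstNe rest (i + 1) else some i

-- reverse scan: over the reversed list with counter j, return n - 1 - j at the first "-"
def lastEqRev : List String → Int → Int → Option Int
  | [], _, _ => none
  | p :: rest, n, j => if p = "-" then some (n - 1 - j) else lastEqRev rest n (j + 1)

def get_idxs_alt (stack : List String) : Option Int × Option Int × Option Int :=
  (firstEq stack 0, lastEqRev stack.reverse (stack.length : Int) 0, firstNe stack 0)

-- ===== PRECONDITION & SPEC =====
def Spec_get_idxs (stack : List String) (out : Option Int × Option Int × Option Int) : Prop := out = get_idxs_alt stack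
instance (stack : List String) (out : Option Int × Option Int × Option Int) : Decidable (Spec_get_idxs stack out) := by unfold Spec_get_idxs; infer_instance

-- ===== CLAIM (what is proved, stated in full; the proofs are below) =====
def Claim_equal_get_idxs : Prop := ∀ (stack : List String), Dom_get_idxs stack → Spec_get_idxs stack (get_idxs stack)

-- ===== LEMMAS AND PROOFS =====

-- forward characterisation of the last "-" index (proof-only helper)
def lastEqFwd : List String → Int → Option Int
  | [], _ => none
  | p :: rest, i => (lastEqFwd rest (i + 1)).or (if p = "-" then some i else none)

lemma getIdxsLoop_inv (stack : List String) :
    ∀ (i : Int) (fs ls fh : Option Int),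
      getIdxsLoop stack i (fs, ls, fh) =
        (fs.or (firstEq stack i), (lastEqFwd stack i).or ls, fh.or (firstNe stack i)) := by
  induction stack with
  | nil => intro i fs ls fh; simp [getIdxsLoop, firstEq, firstNe, lastEqFwd]
  | cons p rest ih =>
    intro i fs ls fh
    by_cases hp : p = "-"
    · simp only [getIdxsLoop, hp, if_true, ih, firstEq, firstNe, lastEqFwd]
      cases fs <;> cases lastEqFwd rest (i + 1) <;> simp [Option.or]
    · simp only [getIdxsLoop, hp, if_false, ih, firstEq, firstNe, lastEqFwd]
      cases fh <;> cases lastEqFwd rest (i + 1) <;> simp [Option.or]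

lemma lastEqRev_shift (l : List String) :
    ∀ (n j : Int), lastEqRev l n j = lastEqRev l (n - j) 0 := by
  induction l with
  | nil => intro n j; simp [lastEqRev]
  | cons p rest ih =>
    intro n j
    by_cases hp : p = "-"
    · simp [lastEqRev, hp]; ring_nf
    · simp only [lastEqRev, hp, if_false]
      rw [ih n (j + 1), ih (n - j) (0 + 1)]
      congr 1
      ring

lemma lastEqFwd_append (l : List String) (a : String) :
    ∀ (i : Int), lastEqFwd (l ++ [a]) i =
      if a = "-" then some (i + (l.length : Int)) else lastEqFwd l i := by
  induction l with
  | nil => intro i; simp [lastEqFwd, Option.or]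
  | cons p rest ih =>
    intro i
    simp only [List.cons_append, lastEqFwd, ih (i + 1)]
    by_cases ha : a = "-"
    · simp [ha, Option.or]
      ring
    · simp [ha]

lemma lastEq_rev_eq (l : List String) :
    ∀ (i : Int), lastEqFwd l i = lastEqRev l.reverse (i + (l.length : Int)) 0 := by
  induction l using List.reverseRecOn with
  | nil => intro i; simp [lastEqFwd, lastEqRev]
  | append_singleton l a ih =>
    intro i
    rw [lastEqFwd_append, List.reverse_append]
    simp only [List.reverse_singleton, List.singleton_append, lastEqRev]
    by_cases ha : a = "-"
    · simp only [ha, if_true]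
      congr 1
      simp [List.length_append]
      ring
    · simp only [ha, if_false]
      rw [lastEqRev_shift, ih i]
      congr 1
      simp [List.length_append]
      ring

-- ===== VERDICT (by name: the statement is the Claim_ definition above) =====
theorem get_idxs_spec : Claim_equal_get_idxs := by
  intro stack _
  unfold Spec_get_idxs get_idxs get_idxs_alt
  rw [getIdxsLoop_inv, lastEq_rev_eq]
  simp
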